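-- pv_equiv track=rewrite | github.com/k1monfared/notes | blog/files/20251201/verify_probabilities.py | can_make_sum
-- ===== SOURCE A (Python) =====
-- def can_make_sum(dice, target_sum):
--     """Check if 4 dice can be paired to make at least one pair with target_sum"""
--     d1, d2, d3, d4 = dice
--
--     # Three ways to pair 4 dice
--     pairs = [
--         [(d1, d2), (d3, d4)],
--         [(d1, d3), (d2, d4)],
--         [(d1, d4), (d2, d3)]
--     ]
--
--     for pairing in pairs:
--         for pair in pairing:
--             if sum(pair) == target_sum:
--                 return True
--     return False
-- ===== SOURCE B (Python) =====
-- def can_make_sum(dice, target_sum):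
--     """Check if 4 dice can be paired to make at least one pair with target_sum"""
--     d1, d2, d3, d4 = dice
--     seen = set()
--     for v in (d1, d2, d3, d4):
--         if target_sum - v in seen:
--             return True
--         seen.add(v)
--     return False
-- ===== Notes on version B (the rewrite author's own statement) =====
-- stated objective: idiomatic
-- what changed: Replaces the hand-enumerated three pairings of four dice with the classic two-sum scan: a single pass maintaining a 'seen' set and testing whether target_sum - value was already seen.
import Mathlib
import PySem

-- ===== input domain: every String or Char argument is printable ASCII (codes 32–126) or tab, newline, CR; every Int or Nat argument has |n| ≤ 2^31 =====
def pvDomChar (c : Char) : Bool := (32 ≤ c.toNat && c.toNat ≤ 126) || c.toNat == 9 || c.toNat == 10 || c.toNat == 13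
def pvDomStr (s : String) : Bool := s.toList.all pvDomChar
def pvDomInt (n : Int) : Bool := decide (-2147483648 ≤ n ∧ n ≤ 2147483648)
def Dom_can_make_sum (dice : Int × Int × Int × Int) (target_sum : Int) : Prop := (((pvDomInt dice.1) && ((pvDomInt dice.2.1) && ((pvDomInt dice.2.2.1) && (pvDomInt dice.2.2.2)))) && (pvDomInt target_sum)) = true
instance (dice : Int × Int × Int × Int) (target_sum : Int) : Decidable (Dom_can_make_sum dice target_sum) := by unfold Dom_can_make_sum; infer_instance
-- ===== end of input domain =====

-- B replaces A's hand-enumerated three pairings with the classic one-pass two-sum scan over a 'seen' set (idiomatic; same return value).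

-- ===== PORT A =====
def can_make_sum (dice : Int × Int × Int × Int) (target_sum : Int) : Bool :=
  let d1 := dice.1; let d2 := dice.2.1; let d3 := dice.2.2.1; let d4 := dice.2.2.2
  let pairs : List (List (Int × Int)) :=
    [[(d1, d2), (d3, d4)],
     [(d1, d3), (d2, d4)],
     [(d1, d4), (d2, d3)]]
  -- the nested for-loops with early 'return True' = any over pairings, any over pairs
  pairs.any (fun pairing => pairing.any (fun pair => pair.1 + pair.2 == target_sum))

-- ===== PORT B =====
-- the for-loop with early 'return True': recursion over the remaining values, carrying the 'seen' set
def canMakeSumLoop (target_sum : Int) (seen : PySem.Set Int) : List Int → Bool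
  | [] => false
  | v :: rest =>
    if PySem.Set.contains seen (target_sum - v) then true
    else canMakeSumLoop target_sum (PySem.Set.add seen v) rest

def can_make_sum_alt (dice : Int × Int × Int × Int) (target_sum : Int) : Bool :=
  let d1 := dice.1; let d2 := dice.2.1; let d3 := dice.2.2.1; let d4 := dice.2.2.2
  canMakeSumLoop target_sum PySem.Set.empty [d1, d2, d3, d4]

-- ===== PRECONDITION & SPEC =====
def Spec_can_make_sum (dice : Int × Int × Int × Int) (target_sum : Int) (out : Bool) : Prop := out = can_make_sum_alt dice target_sum
instance (dice : Int × Int × Int × Int) (target_sum : Int) (out : Bool) : Decidable (Spec_can_make_sum dice target_sum out) := by unfold Spec_can_make_sum; infer_instance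

-- ===== CLAIM (what is proved, stated in full; the proofs are below) =====
def Claim_equal_can_make_sum : Prop := ∀ (dice : Int × Int × Int × Int) (target_sum : Int), Dom_can_make_sum dice target_sum → Spec_can_make_sum dice target_sum (can_make_sum dice target_sum)

-- ===== LEMMAS AND PROOFS =====

-- ===== VERDICT (by name: the statement is the Claim_ definition above) =====
theorem can_make_sum_spec : Claim_equal_can_make_sum := by
  intro ⟨d1, d2, d3, d4⟩ t _
  show _ = _
  simp only [can_make_sum, can_make_sum_alt, canMakeSumLoop,
    PySem.Set.contains, PySem.Set.add, PySem.Set.empty,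
    List.any_cons, List.any_nil, List.contains_nil]
  split_ifs <;> simp_all <;> omega
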